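-- pv_equiv track=rewrite | github.com/dpalatynski/AdventOfCode | 2023/solutions/Day_11.py | calculate_empty_rows
-- ===== SOURCE A (Python) =====
-- def calculate_empty_rows(image):
--     no_empty = []
--     current = 0
--     for line in image:
--         if "#" not in line:
--             current += 1
--         no_empty.append(current)
--
--     return no_empty
-- ===== SOURCE B (Python) =====
-- import bisect
--
-- def calculate_empty_rows(image):
--     empty_indices = [i for i, line in enumerate(image) if "#" not in line]
--     return [bisect.bisect_right(empty_indices, i) for i in range(len(image))]
-- ===== Notes on version B (the rewrite author's own statement) =====
-- stated objective: alternative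
-- what changed: Instead of threading a running counter through one loop, B first collects the sorted indices of '#'-free rows and then answers each position i with bisect_right(empty_indices, i), i.e. a rank query on the index list.
import Mathlib
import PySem

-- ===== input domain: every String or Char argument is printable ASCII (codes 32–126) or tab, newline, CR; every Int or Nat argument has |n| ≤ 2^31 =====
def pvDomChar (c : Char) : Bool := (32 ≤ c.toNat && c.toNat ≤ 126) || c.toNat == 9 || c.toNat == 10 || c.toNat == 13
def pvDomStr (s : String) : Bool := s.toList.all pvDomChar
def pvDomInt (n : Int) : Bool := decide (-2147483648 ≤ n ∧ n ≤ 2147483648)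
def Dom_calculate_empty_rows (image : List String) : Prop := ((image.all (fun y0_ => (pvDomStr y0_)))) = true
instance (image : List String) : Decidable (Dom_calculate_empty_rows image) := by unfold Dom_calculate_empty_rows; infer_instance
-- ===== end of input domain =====

-- B replaces the running counter threaded through one loop by collecting the sorted
-- indices of '#'-free rows and then answering each position i with a bisect_right rank
-- query on that index list (objective: alternative).

-- ===== PORT A =====
-- for line in image: if "#" not in line: current += 1; no_empty.append(current)
def calculate_empty_rows (image : List String) : List Int :=
  (image.foldl
    (fun (st : List Int × Int) line =>
      let current := if PySem.Str.isIn "#" line then st.2 else st.2 + 1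
      (st.1 ++ [current], current))
    ([], 0)).1

-- ===== PORT B =====
-- empty_indices = [i for i, line in enumerate(image) if "#" not in line]
-- bisect.bisect_right(empty_indices, i) is ported as countP (· ≤ i): exact, because
-- bisect_right on a sorted list returns the number of elements ≤ i and empty_indices
-- (a subsequence of enumerate's indices) is strictly increasing.
def calculate_empty_rows_alt (image : List String) : List Int :=
  let empty_indices : List Int :=
    ((PySem.List.enumerate image 0).filter (fun p => !PySem.Str.isIn "#" p.2)).map (fun p => p.1)
  (PySem.List.pyRange 0 (image.length : Int) 1).map
    (fun i => ((empty_indices.countP (fun j => j ≤ i) : Nat) : Int))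

-- ===== PRECONDITION & SPEC =====
def Spec_calculate_empty_rows (image : List String) (out : List Int) : Prop := out = calculate_empty_rows_alt image
instance (image : List String) (out : List Int) : Decidable (Spec_calculate_empty_rows image out) := by unfold Spec_calculate_empty_rows; infer_instance

-- ===== CLAIM (what is proved, stated in full; the proofs are below) =====
def Claim_equal_calculate_empty_rows : Prop := ∀ (image : List String), Dom_calculate_empty_rows image → Spec_calculate_empty_rows image (calculate_empty_rows image)

-- ===== LEMMAS AND PROOFS =====

-- shared reference value: number of '#'-free lines among the first k lines, as Int
def pvCnt (image : List String) (k : Nat) : Int :=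
  ((image.take k).countP (fun l => !PySem.Str.isIn "#" l) : Nat)

lemma pvCnt_cons_succ (l : String) (ls : List String) (k : Nat) :
    pvCnt (l :: ls) (k + 1)
      = (if PySem.Str.isIn "#" l then 0 else 1) + pvCnt ls k := by
  simp only [pvCnt, List.take_succ_cons, List.countP_cons]
  by_cases h : PySem.Chars.isIn ['#'] l.toList = true
  · simp [PySem.Str.isIn, h]
  · simp [PySem.Str.isIn, h]; omega

-- A's fold produces the prefix counts shifted by the running counter
lemma foldA_eq (image : List String) (acc : List Int) (cur : Int) :
    (image.foldl
      (fun (st : List Int × Int) line =>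
        let current := if PySem.Str.isIn "#" line then st.2 else st.2 + 1
        (st.1 ++ [current], current))
      (acc, cur)).1
    = acc ++ (List.range image.length).map (fun k => cur + pvCnt image (k + 1)) := by
  induction image generalizing acc cur with
  | nil => simp
  | cons l ls ih =>
    rw [List.foldl_cons]
    simp only []
    rw [ih]
    simp only [List.length_cons, List.range_succ_eq_map, List.map_cons, List.map_map]
    rw [List.append_assoc]
    congr 1
    simp only [List.singleton_append]
    congr 1
    · have := pvCnt_cons_succ l ls 0
      simp [pvCnt] at this ⊢
      by_cases h : PySem.Chars.isIn ['#'] l.toList = true <;> simp [h]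
    · apply List.map_congr_left
      intro k _
      simp only [Function.comp, Nat.succ_eq_add_one]
      rw [pvCnt_cons_succ l ls (k+1)]
      by_cases h : PySem.Chars.isIn ['#'] l.toList = true <;> simp [PySem.Str.isIn, h] <;> ring

-- B's rank query over the enumerated empty indices equals the prefix count
lemma rank_eq (image : List String) (s : Int) (k : Nat) :
    ((PySem.List.enumerate image s).countP
        (fun p => decide (p.1 ≤ s + k) && !PySem.Str.isIn "#" p.2) : Nat)
      = (image.take (k + 1)).countP (fun l => !PySem.Str.isIn "#" l) := by
  induction image generalizing s k with
  | nil => simp [PySem.List.enumerate_nil]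
  | cons l ls ih =>
    rw [PySem.List.enumerate_cons, List.countP_cons]
    cases k with
    | zero =>
      have hz : ((PySem.List.enumerate ls (s+1)).countP
          (fun p => decide (p.1 ≤ s + ((0:Nat):Int)) && !PySem.Str.isIn "#" p.2)) = 0 := by
        apply List.countP_eq_zero.mpr
        intro p hp
        rcases (PySem.List.mem_enumerate_iff ls (s+1) p).mp hp with ⟨j, hj, rfl⟩
        simp only [Bool.and_eq_true, decide_eq_true_eq]
        intro h
        omega
      rw [hz]
      simp [List.countP_cons]
    | succ k' =>
      rw [show (fun (p : Int × String) => decide (p.1 ≤ s + ((k' + 1 : Nat) : Int)) && !PySem.Str.isIn "#" p.2)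
            = (fun p => decide (p.1 ≤ (s + 1) + ((k' : Nat) : Int)) && !PySem.Str.isIn "#" p.2) by
        funext p; rw [show (s : Int) + ((k' + 1 : Nat) : Int) = (s + 1) + ((k' : Nat) : Int) by push_cast; ring]]
      rw [ih (s+1) k']
      simp only [List.take_succ_cons, List.countP_cons]
      have h0 : decide ((s : Int) ≤ s + ((k' + 1 : Nat) : Int)) = true := by
        simp; omega
      rw [h0]
      simp only [Bool.true_and]

lemma altB_eq (image : List String) :
    calculate_empty_rows_alt image
      = (List.range image.length).map (fun k => pvCnt image (k + 1)) := by
  unfold calculate_empty_rows_alt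
  rw [PySem.List.pyRange_one]
  simp only [sub_zero, Int.toNat_natCast, List.map_map]
  apply List.map_congr_left
  intro k hk
  simp only [Function.comp_apply, List.countP_map, List.countP_filter]
  rw [rank_eq image 0 k]
  simp [pvCnt]

-- ===== VERDICT (by name: the statement is the Claim_ definition above) =====
theorem calculate_empty_rows_spec : Claim_equal_calculate_empty_rows := by
  intro image _
  unfold Spec_calculate_empty_rows calculate_empty_rows
  rw [foldA_eq, altB_eq]
  simp
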